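-- pv_equiv track=rewrite | github.com/yiwanfuhao0731/JY_completed | Caxton/panormus/data/open_data.py | __get_key_tuple
-- ===== SOURCE A (Python) =====
-- def __get_key_tuple(key_parts):
--     (item, attribute, cut, source) = [None] * 4
--     for p in key_parts:
--         if p['Key'] == 'item':
--             item = p['Value']
--         elif p['Key'] == 'attribute':
--             attribute = p['Value']
--         elif p['Key'] == 'cut':
--             cut = p['Value']
--         elif p['Key'] == 'source':
--             source = p['Value']
--     return item, attribute, cut, source
-- ===== SOURCE B (Python) =====
-- _NAMES = ('item', 'attribute', 'cut', 'source')
--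
-- def __get_key_tuple(key_parts):
--     def _last(name):
--         # last occurrence wins = first match scanning from the end
--         for p in reversed(key_parts):
--             if p['Key'] == name:
--                 return p['Value']
--         return None
--     return tuple(_last(n) for n in _NAMES)
-- ===== Notes on version B (the rewrite author's own statement) =====
-- stated objective: alternative
-- what changed: Replaces A's single forward fold that overwrites four accumulators with four independent backward searches with early exit: for each name, scan reversed(key_parts) and return the first match's Value (= last occurrence), with no accumulator state at all.
import Mathlib
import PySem

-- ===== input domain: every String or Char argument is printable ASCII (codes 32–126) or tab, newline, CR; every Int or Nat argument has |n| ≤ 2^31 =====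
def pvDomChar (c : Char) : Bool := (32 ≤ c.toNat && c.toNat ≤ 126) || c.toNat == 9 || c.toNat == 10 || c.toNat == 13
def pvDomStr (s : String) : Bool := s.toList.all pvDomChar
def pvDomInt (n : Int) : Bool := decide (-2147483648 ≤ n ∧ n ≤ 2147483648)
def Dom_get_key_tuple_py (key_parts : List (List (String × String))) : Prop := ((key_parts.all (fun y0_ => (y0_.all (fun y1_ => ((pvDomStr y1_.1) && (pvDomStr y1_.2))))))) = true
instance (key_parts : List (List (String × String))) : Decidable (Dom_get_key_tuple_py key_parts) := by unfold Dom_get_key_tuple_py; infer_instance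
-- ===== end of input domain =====

-- B replaces A's forward fold over four accumulators with four independent backward
-- early-exit searches (first match in the reversed list = last occurrence); objective: alternative.

-- ===== PORT A =====
-- A's loop body: four Option-valued accumulators, one if/elif chain per element.
def pvStepA (s : Option String × Option String × Option String × Option String)
    (p : List (String × String)) :
    Option String × Option String × Option String × Option String :=
  let d := PySem.Dict.ofList p
  if d.get? "Key" == some "item" then (d.get? "Value", s.2.1, s.2.2.1, s.2.2.2)
  else if d.get? "Key" == some "attribute" then (s.1, d.get? "Value", s.2.2.1, s.2.2.2)
  else if d.get? "Key" == some "cut" then (s.1, s.2.1, d.get? "Value", s.2.2.2)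
  else if d.get? "Key" == some "source" then (s.1, s.2.1, s.2.2.1, d.get? "Value")
  else s

def get_key_tuple_py (key_parts : List (List (String × String))) :
    Option String × Option String × Option String × Option String :=
  key_parts.foldl pvStepA (none, none, none, none)

-- ===== PORT B =====
-- B's helper _last: scan the reversed list, return the first matching part's Value.
def pvScanB (name : String) : List (List (String × String)) → Option String
  | [] => none
  | p :: t =>
      let dp := PySem.Dict.ofList p
      if dp.get? "Key" == some name then dp.get? "Value"
      else pvScanB name t

def get_key_tuple_py_alt (key_parts : List (List (String × String))) :
    Option String × Option String × Option String × Option String :=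
  let rev := key_parts.reverse
  (pvScanB "item" rev, pvScanB "attribute" rev, pvScanB "cut" rev, pvScanB "source" rev)

-- ===== PRECONDITION & SPEC =====
-- Pre_ excludes exactly the inputs where the Python A raises KeyError: a part without a
-- 'Key', or whose Key is one of the four names but which lacks a 'Value'.
def Pre_get_key_tuple_py (key_parts : List (List (String × String))) : Prop :=
  (key_parts.all (fun p =>
    let d := PySem.Dict.ofList p
    d.contains "Key" &&
      (!(d.getD "Key" "" == "item" || d.getD "Key" "" == "attribute" ||
         d.getD "Key" "" == "cut" || d.getD "Key" "" == "source") || d.contains "Value"))) = true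
instance (key_parts : List (List (String × String))) : Decidable (Pre_get_key_tuple_py key_parts) := by unfold Pre_get_key_tuple_py; infer_instance

def pvWitness_get_key_tuple_py : (List (List (String × String))) :=
  [[("Key", "item"), ("Value", "px")], [("Key", "other")], [("Key", "cut"), ("Value", "c1")]]

def Spec_get_key_tuple_py (key_parts : List (List (String × String))) (out : Option String × Option String × Option String × Option String) : Prop := out = get_key_tuple_py_alt key_parts
instance (key_parts : List (List (String × String))) (out : Option String × Option String × Option String × Option String) : Decidable (Spec_get_key_tuple_py key_parts out) := by unfold Spec_get_key_tuple_py; infer_instance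

-- ===== CLAIM (what is proved, stated in full; the proofs are below) =====
def Claim_equal_get_key_tuple_py : Prop := ∀ (key_parts : List (List (String × String))), Dom_get_key_tuple_py key_parts → Pre_get_key_tuple_py key_parts → Spec_get_key_tuple_py key_parts (get_key_tuple_py key_parts)

-- ===== LEMMAS AND PROOFS =====

-- One component's update by one element: overwrite iff the element's Key equals name.
def pvU (p : List (String × String)) (name : String) (a : Option String) : Option String :=
  if (PySem.Dict.ofList p).get? "Key" == some name then (PySem.Dict.ofList p).get? "Value" else a

-- Forward accumulation of one component over the list.
def pvF (name : String) : List (List (String × String)) → Option String → Option String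
  | [], a => a
  | p :: t, a => pvF name t (pvU p name a)

lemma pvStepA_comps (s : Option String × Option String × Option String × Option String)
    (p : List (String × String)) :
    pvStepA s p = (pvU p "item" s.1, pvU p "attribute" s.2.1, pvU p "cut" s.2.2.1, pvU p "source" s.2.2.2) := by
  unfold pvStepA pvU
  cases h : (PySem.Dict.ofList p).get? "Key" with
  | none => simp [h]
  | some k =>
      by_cases h1 : k = "item"
      · simp [h, h1]
      · by_cases h2 : k = "attribute"
        · simp [h, h2]
        · by_cases h3 : k = "cut"
          · simp [h, h3]
          · by_cases h4 : k = "source"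
            · simp [h, h4]
            · simp [h, h1, h2, h3, h4]

lemma foldA_comps (l : List (List (String × String)))
    (s : Option String × Option String × Option String × Option String) :
    l.foldl pvStepA s = (pvF "item" l s.1, pvF "attribute" l s.2.1, pvF "cut" l s.2.2.1, pvF "source" l s.2.2.2) := by
  induction l generalizing s with
  | nil => rfl
  | cons p t ih =>
      simp only [List.foldl_cons, pvStepA_comps, ih, pvF]

lemma pvF_append (name : String) (l : List (List (String × String)))
    (p : List (String × String)) (a : Option String) :
    pvF name (l ++ [p]) a = pvU p name (pvF name l a) := by
  induction l generalizing a with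
  | nil => rfl
  | cons q t ih => simp only [List.cons_append, pvF, ih]

lemma pvF_none_eq_scan (name : String) (l : List (List (String × String))) :
    pvF name l none = pvScanB name l.reverse := by
  induction l using List.reverseRecOn with
  | nil => rfl
  | append_singleton t p ih =>
      rw [pvF_append, ih, List.reverse_append]
      simp only [List.reverse_cons, List.reverse_nil, List.nil_append, List.singleton_append,
        pvScanB, pvU]

-- ===== VERDICT (by name: the statement is the Claim_ definition above) =====
theorem get_key_tuple_py_spec : Claim_equal_get_key_tuple_py := by
  intro key_parts _ _
  unfold Spec_get_key_tuple_py get_key_tuple_py get_key_tuple_py_alt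
  rw [foldA_comps]
  simp only [pvF_none_eq_scan]
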